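-- pv_equiv track=rewrite | github.com/super-sid/assistantGPT | main.py | clean_yaml_tabs
-- ===== SOURCE A (Python) =====
-- def clean_yaml_tabs(yaml_content):
--     # Detect the level of indentation before a tab
--     lines = yaml_content.split('\n')
--     cleaned_lines = []
--
--     for line in lines:
--         if '\t' in line:
--             spaces_before_tab = len(line) - len(line.lstrip())
--             # Replace tabs with newline and appropriate indentation
--             line = line.replace('\t', '\n' + ' ' * spaces_before_tab)
--         cleaned_lines.append(line)
--
--     return '\n'.join(cleaned_lines)
-- ===== SOURCE B (Python) =====
-- def clean_yaml_tabs(yaml_content):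
--     # Single left-to-right scan: per line, count the leading-whitespace run once,
--     # then emit characters, substituting each tab with '\n' + that many spaces.
--     s = yaml_content
--     n = len(s)
--     out = []
--     i = 0
--     while True:
--         j = i
--         while j < n and s[j] in ' \t\r':
--             j += 1
--         pad = '\n' + ' ' * (j - i)
--         k = s.find('\n', i)
--         end = n if k < 0 else k
--         for c in s[i:end]:
--             out.append(pad if c == '\t' else c)
--         if k < 0:
--             break
--         out.append('\n')
--         i = k + 1
--     return ''.join(out)
-- ===== Notes on version B (the rewrite author's own statement) =====
-- stated objective: alternative
-- what changed: Replaces split-into-lines / lstrip / str.replace / join with a single left-to-right scan that, at each line start, counts the leading-whitespace run once and then emits characters, substituting tabs inline.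
import Mathlib
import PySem

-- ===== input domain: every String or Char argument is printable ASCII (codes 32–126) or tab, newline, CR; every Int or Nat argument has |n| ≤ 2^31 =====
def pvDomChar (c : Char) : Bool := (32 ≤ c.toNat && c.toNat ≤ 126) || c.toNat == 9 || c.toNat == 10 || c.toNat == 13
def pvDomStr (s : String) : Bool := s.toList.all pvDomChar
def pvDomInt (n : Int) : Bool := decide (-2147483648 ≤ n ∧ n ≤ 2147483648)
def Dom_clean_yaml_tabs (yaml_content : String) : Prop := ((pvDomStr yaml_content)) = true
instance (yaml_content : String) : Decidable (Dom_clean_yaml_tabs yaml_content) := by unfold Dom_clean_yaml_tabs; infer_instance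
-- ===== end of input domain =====

-- B replaces A's split-into-lines / lstrip / replace / join pipeline by one left-to-right scan
-- with a per-line leading-whitespace count (objective: alternative decomposition, same O(n) cost).

-- ===== PORT A =====
-- per-line body of A's for-loop
def aLine (line : List Char) : List Char :=
  if PySem.Chars.isIn ['\t'] line then
    PySem.Chars.replace line ['\t']
      ('\n' :: List.replicate (line.length - (PySem.Chars.lstrip line).length) ' ')
  else line

def clean_yaml_tabs (yaml_content : String) : String :=
  String.ofList (PySem.Chars.join ['\n'] ((PySem.Chars.splitOn yaml_content.toList ['\n']).map aLine))

-- ===== PORT B =====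
-- membership test `c in ' \t\r'`
def pvIsWS (c : Char) : Bool := c = ' ' || c = '\t' || c = '\r'

-- inner for-loop of B: emit each char of the line, a tab becomes pad
def altLine (pad : List Char) : List Char → List Char
  | [] => []
  | c :: rest => (if c = '\t' then pad else [c]) ++ altLine pad rest

-- outer while-loop of B: one iteration per line
def altGo (cs : List Char) : List Char :=
  let pad : List Char := '\n' :: List.replicate (cs.takeWhile pvIsWS).length ' '
  match h : cs.dropWhile (fun c => c ≠ '\n') with
  | [] => altLine pad cs
  | _ :: r => altLine pad (cs.takeWhile (fun c => c ≠ '\n')) ++ '\n' :: altGo r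
termination_by cs.length
decreasing_by
  have h1 : (cs.dropWhile (fun c => c ≠ '\n')).length ≤ cs.length := cs.length_dropWhile_le _
  rw [h] at h1; simp at h1; omega

def clean_yaml_tabs_alt (yaml_content : String) : String :=
  String.ofList (altGo yaml_content.toList)

-- ===== PRECONDITION & SPEC =====
def Spec_clean_yaml_tabs (yaml_content : String) (out : String) : Prop := out = clean_yaml_tabs_alt yaml_content
instance (yaml_content : String) (out : String) : Decidable (Spec_clean_yaml_tabs yaml_content out) := by unfold Spec_clean_yaml_tabs; infer_instance

-- ===== CLAIM (what is proved, stated in full; the proofs are below) =====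
def Claim_equal_clean_yaml_tabs : Prop := ∀ (yaml_content : String), Dom_clean_yaml_tabs yaml_content → Spec_clean_yaml_tabs yaml_content (clean_yaml_tabs yaml_content)

-- ===== LEMMAS AND PROOFS =====

-- specification-side splitter: what `cs.split('\n')` returns, structurally
def prependFirst (pre : List Char) : List (List Char) → List (List Char)
  | [] => [pre]
  | x :: xs => (pre ++ x) :: xs

def splitNL : List Char → List (List Char)
  | [] => [[]]
  | c :: rest => if c = '\n' then [] :: splitNL rest else prependFirst [c] (splitNL rest)

theorem char_eq_iff_toNat (c d : Char) : (c = d) ↔ c.toNat = d.toNat :=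
  ⟨fun h => h ▸ rfl, fun h => Char.ext (UInt32.toNat_inj.mp h)⟩

-- on the admitted domain, Python's str.lstrip whitespace test agrees with `c in ' \t\r'` off '\n'
theorem ws_char (c : Char) (hd : pvDomChar c = true) (hn : c ≠ '\n') :
    PySem.Chars.isspace c = pvIsWS c := by
  have hn' : c.toNat ≠ 10 := fun h => hn ((char_eq_iff_toNat c '\n').mpr h)
  simp only [pvDomChar, Bool.or_eq_true, Bool.and_eq_true, decide_eq_true_eq, beq_iff_eq] at hd
  rw [Bool.eq_iff_iff]
  simp only [PySem.Chars.isspace, pvIsWS, Bool.or_eq_true, Bool.and_eq_true, decide_eq_true_eq,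
    char_eq_iff_toNat, show (' '.toNat) = 32 from rfl, show ('\t'.toNat) = 9 from rfl,
    show ('\r'.toNat) = 13 from rfl]
  omega

theorem replace_go_tab (pad : List Char) : ∀ (fuel : Nat) (l acc : List Char), l.length ≤ fuel →
    PySem.Chars.replace.go ['\t'] pad fuel l acc = acc.reverse ++ altLine pad l := by
  intro fuel
  induction fuel with
  | zero =>
    intro l acc h
    have hl : l = [] := List.length_eq_zero_iff.mp (Nat.le_zero.mp h)
    subst hl; simp [PySem.Chars.replace.go, altLine]
  | succ n ih =>
    intro l acc h
    cases l with
    | nil => simp [PySem.Chars.replace.go, altLine]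
    | cons c t =>
      simp only [PySem.Chars.replace.go]
      by_cases hc : c = '\t'
      · subst hc
        simp only [List.isPrefixOf]
        rw [ih]
        · simp [altLine]
        · simp at h ⊢; omega
      · simp only [List.isPrefixOf]
        rw [if_neg, ih]
        · simp [altLine, hc]
        · simp at h ⊢; omega
        · simpa using fun e => hc e.symm

theorem replace_eq_altLine (pad l : List Char) :
    PySem.Chars.replace l ['\t'] pad = altLine pad l := by
  simp [PySem.Chars.replace]
  rw [replace_go_tab pad l.length l [] (le_refl _)]
  simp

theorem altLine_no_tab (pad : List Char) (l : List Char) (h : '\t' ∉ l) : altLine pad l = l := by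
  induction l with
  | nil => rfl
  | cons c t ih =>
    simp only [altLine]
    simp only [List.mem_cons, not_or] at h
    rw [if_neg (fun e => h.1 e.symm), ih h.2]
    rfl

theorem splitNL_ne_nil (cs : List Char) : splitNL cs ≠ [] := by
  cases cs with
  | nil => simp [splitNL]
  | cons c rest =>
    simp only [splitNL]
    split
    · simp
    · cases h : splitNL rest <;> simp [prependFirst]

theorem splitNL_no_nl (l : List Char) (h : ∀ c ∈ l, c ≠ '\n') : splitNL l = [l] := by
  induction l with
  | nil => rfl
  | cons c t ih =>
    simp only [splitNL, if_neg (h c (List.mem_cons_self))]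
    rw [ih (fun x hx => h x (List.mem_cons_of_mem _ hx))]
    rfl

theorem splitNL_append_nl (l r : List Char) (h : ∀ c ∈ l, c ≠ '\n') :
    splitNL (l ++ '\n' :: r) = l :: splitNL r := by
  induction l with
  | nil => simp [splitNL]
  | cons c t ih =>
    simp only [List.cons_append, splitNL, if_neg (h c (List.mem_cons_self))]
    rw [ih (fun x hx => h x (List.mem_cons_of_mem _ hx))]
    rfl

theorem splitOn_go_nl : ∀ (fuel : Nat) (l cur : List Char) (accL : List (List Char)),
    l.length < fuel →
    PySem.Chars.splitOn.go ['\n'] fuel l cur accL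
      = accL.reverse ++ prependFirst cur.reverse (splitNL l) := by
  intro fuel
  induction fuel with
  | zero => intro l cur accL h; omega
  | succ n ih =>
    intro l cur accL h
    cases l with
    | nil => simp [PySem.Chars.splitOn.go, splitNL, prependFirst]
    | cons c rest =>
      simp only [PySem.Chars.splitOn.go]
      by_cases hc : c = '\n'
      · subst hc
        rw [if_pos (by simp [List.isPrefixOf])]
        simp only [List.length_cons] at h
        rw [ih _ _ _ (by simpa using Nat.lt_of_succ_lt_succ h)]
        have hne := splitNL_ne_nil rest
        cases hsr : splitNL rest with
        | nil => exact absurd hsr hne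
        | cons y ys =>
          simp [splitNL, prependFirst, hsr]
      · rw [if_neg (by simpa [List.isPrefixOf] using fun e => hc e.symm)]
        simp only [List.length_cons] at h
        rw [ih _ _ _ (Nat.lt_of_succ_lt_succ h)]
        simp only [splitNL, if_neg hc, List.reverse_cons]
        cases hsr : splitNL rest <;> simp [prependFirst]

theorem splitOn_eq_splitNL (l : List Char) :
    PySem.Chars.splitOn l ['\n'] = splitNL l := by
  simp only [PySem.Chars.splitOn]
  rw [splitOn_go_nl (l.length + 1) l [] [] (Nat.lt_succ_self _)]
  have hne := splitNL_ne_nil l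
  cases h : splitNL l with
  | nil => exact absurd h hne
  | cons y ys => simp [prependFirst]

-- the two whitespace scans agree on '\n'-free domain lines
theorem takeWhile_ws_congr (l : List Char) (hd : ∀ c ∈ l, pvDomChar c = true)
    (hn : ∀ c ∈ l, c ≠ '\n') :
    l.takeWhile PySem.Chars.isspace = l.takeWhile pvIsWS := by
  induction l with
  | nil => rfl
  | cons c t ih =>
    rw [List.takeWhile_cons, List.takeWhile_cons,
      ws_char c (hd c List.mem_cons_self) (hn c List.mem_cons_self)]
    cases hw : pvIsWS c with
    | false => rfl
    | true =>
      rw [ih (fun x hx => hd x (List.mem_cons_of_mem _ hx))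
          (fun x hx => hn x (List.mem_cons_of_mem _ hx))]

theorem pvIsWS_ne_nl (c : Char) (h : pvIsWS c = true) : c ≠ '\n' := by
  simp only [pvIsWS, Bool.or_eq_true, decide_eq_true_eq] at h
  rcases h with (h | h) | h <;> subst h <;> decide

-- the indent run of a line is the indent run of the whole rest of the string
theorem takeWhile_ws_takeWhile (cs : List Char) :
    (cs.takeWhile (fun c => c ≠ '\n')).takeWhile pvIsWS = cs.takeWhile pvIsWS := by
  induction cs with
  | nil => rfl
  | cons c t ih =>
    cases hw : pvIsWS c with
    | true =>
      rw [List.takeWhile_cons_of_pos (by simpa using pvIsWS_ne_nl c hw),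
        List.takeWhile_cons, List.takeWhile_cons, hw, ih]
    | false =>
      by_cases hc : c = '\n'
      · rw [List.takeWhile_cons_of_neg (by simpa using hc), List.takeWhile_cons, hw]
        rfl
      · rw [List.takeWhile_cons_of_pos (by simpa using hc),
          List.takeWhile_cons, List.takeWhile_cons, hw]
        simp

-- A's per-line body equals B's per-line emission, on '\n'-free domain lines
theorem aLine_eq_altLine (l : List Char) (hd : ∀ c ∈ l, pvDomChar c = true)
    (hn : ∀ c ∈ l, c ≠ '\n') :
    aLine l = altLine ('\n' :: List.replicate (l.takeWhile pvIsWS).length ' ') l := by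
  have hlen : l.length - (PySem.Chars.lstrip l).length = (l.takeWhile pvIsWS).length := by
    have h1 : (l.takeWhile PySem.Chars.isspace).length
        + (l.dropWhile PySem.Chars.isspace).length = l.length := by
      rw [← List.length_append, List.takeWhile_append_dropWhile]
    rw [PySem.Chars.lstrip, ← takeWhile_ws_congr l hd hn]
    omega
  by_cases htab : '\t' ∈ l
  · rw [aLine, if_pos (by rw [PySem.Chars.isIn_iff_infix]; exact (List.singleton_infix_iff _ _).mpr htab),
      hlen, replace_eq_altLine]
  · rw [aLine, if_neg (by rw [PySem.Chars.isIn_iff_infix, List.singleton_infix_iff]; exact htab),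
      altLine_no_tab _ _ htab]

-- main equivalence, by induction following B's per-line loop
theorem clean_yaml_tabs_main : ∀ (n : Nat) (cs : List Char), cs.length ≤ n →
    (∀ c ∈ cs, pvDomChar c = true) →
    PySem.Chars.join ['\n'] ((splitNL cs).map aLine) = altGo cs := by
  intro n
  induction n with
  | zero =>
    intro cs hlen _
    have : cs = [] := List.length_eq_zero_iff.mp (Nat.le_zero.mp hlen)
    subst this
    rw [show splitNL [] = [[]] from rfl, List.map_cons, List.map_nil,
      PySem.Chars.join_singleton, altGo.eq_def]
    simp only [aLine, altLine]
    decide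
  | succ n ih =>
    intro cs hlen hdom
    rw [altGo.eq_def]
    split
    · next heq =>
      have hnl : ∀ c ∈ cs, c ≠ '\n' := by
        intro c hc
        have := (List.dropWhile_eq_nil_iff.mp heq) c hc
        simpa using this
      rw [splitNL_no_nl cs hnl, List.map_cons, List.map_nil, PySem.Chars.join_singleton,
        aLine_eq_altLine cs hdom hnl]
    · next x r heq =>
      have hx : x = '\n' := by
        clear ih hlen hdom
        simp only [ne_eq, decide_not] at heq
        induction cs with
        | nil => simp at heq
        | cons c t ih2 =>
          rw [List.dropWhile_cons] at heq
          by_cases hc : c = '\n'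
          · simp [hc] at heq; exact heq.1.symm
          · simp [hc] at heq; exact ih2 heq
      subst hx
      have hsplit : cs.takeWhile (fun c => c ≠ '\n') ++ '\n' :: r = cs := by
        rw [show ('\n' :: r) = cs.dropWhile (fun c => c ≠ '\n') from heq.symm,
          List.takeWhile_append_dropWhile]
      have hlinenl : ∀ c ∈ cs.takeWhile (fun c => c ≠ '\n'), c ≠ '\n' := by
        intro c hc
        simpa using List.mem_takeWhile_imp hc
      have hlined : ∀ c ∈ cs.takeWhile (fun c => c ≠ '\n'), pvDomChar c = true := by
        intro c hc
        exact hdom c (by rw [← hsplit]; exact List.mem_append_left _ hc)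
      have hrd : ∀ c ∈ r, pvDomChar c = true := by
        intro c hc
        exact hdom c (by rw [← hsplit]; exact List.mem_append_right _ (List.mem_cons_of_mem _ hc))
      have hrlen : r.length ≤ n := by
        have := congrArg List.length hsplit
        simp only [List.length_append, List.length_cons] at this
        omega
      conv_lhs => rw [← hsplit]
      rw [splitNL_append_nl _ r hlinenl, List.map_cons]
      have hne := splitNL_ne_nil r
      rcases hsr : splitNL r with _ | ⟨y, ys⟩
      · exact absurd hsr hne
      · rw [List.map_cons, PySem.Chars.join_cons_cons, ← List.map_cons, ← hsr,
          ih r hrlen hrd,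
          aLine_eq_altLine _ hlined hlinenl, takeWhile_ws_takeWhile]
        simp

-- ===== VERDICT (by name: the statement is the Claim_ definition above) =====
theorem clean_yaml_tabs_spec : Claim_equal_clean_yaml_tabs := by
  intro s hdom
  unfold Spec_clean_yaml_tabs clean_yaml_tabs clean_yaml_tabs_alt
  have hd : ∀ c ∈ s.toList, pvDomChar c = true := by
    simpa [Dom_clean_yaml_tabs, pvDomStr, List.all_eq_true] using hdom
  rw [splitOn_eq_splitNL, clean_yaml_tabs_main s.toList.length s.toList (le_refl _) hd]
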